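-- pv_equiv track=rewrite | github.com/kkeolmusae/algorithm | 프로그래머스/2/60058. 괄호 변환/괄호 변환.py | solution
-- ===== SOURCE A (Python) =====
-- def check_correct(s):
--     l_count = 0
--     for i in range(len(s)):
--         st = s[i]
--         if st == "(":
--             l_count += 1
--         else:
--             l_count -= 1
--
--         if l_count < 0:
--             return False
--     return True
--
-- def split_u_v(s):
--     l_count = 0  # ( 처럼 생긴거
--     r_count = 0  # ) 처럼 생긴거
--
--     for i in range(len(s)):
--         st = s[i]
--         if l_count == r_count and l_count > 0:
--             break
--         if st == "(":
--             l_count += 1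
--         else:
--             r_count += 1
--     return s[: l_count + r_count], s[l_count + r_count :]
--
-- def solution(p):
--     if p == "":
--         return ""
--
--     answer = ""
--
--     u, v = split_u_v(p)
--
--     if check_correct(u):
--         answer = u + solution(v)
--     else:
--         answer = "("
--         answer += solution(v)
--         answer += ")"
--
--         u = list(u[1:-1])
--         for i in range(len(u)):
--             if u[i] == "(":
--                 u[i] = ")"
--             else:
--                 u[i] = "("
--         answer += "".join(u)
--
--     return answer
-- ===== SOURCE B (Python) =====
-- def _never_dips(u):
--     bal = 0
--     for c in u:
--         bal = bal + 1 if c == "(" else bal - 1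
--         if bal < 0:
--             return False
--     return True
--
-- def solution(p):
--     # phase 1: one balance scan cutting p into minimal balanced chunks
--     chunks = []
--     bal = 0
--     start = 0
--     for i, c in enumerate(p):
--         bal = bal + 1 if c == "(" else bal - 1
--         if bal == 0:
--             chunks.append(p[start:i + 1])
--             start = i + 1
--     if start < len(p):
--         chunks.append(p[start:])
--     # phase 2: fold chunks right-to-left into the answer
--     acc = ""
--     for u in reversed(chunks):
--         if _never_dips(u):
--             acc = u + acc
--         else:
--             acc = "(" + acc + ")" + "".join(")" if c == "(" else "(" for c in u[1:-1])
--     return acc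
-- ===== Notes on version B (the rewrite author's own statement) =====
-- stated objective: alternative
-- what changed: Replaces A's recursion on the remaining suffix (re-splitting u/v at each level) by an explicit two-phase iteration: one left-to-right balance scan cuts p into its minimal balanced chunks, then a single right-to-left fold over the chunk list builds the answer.
import Mathlib
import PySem

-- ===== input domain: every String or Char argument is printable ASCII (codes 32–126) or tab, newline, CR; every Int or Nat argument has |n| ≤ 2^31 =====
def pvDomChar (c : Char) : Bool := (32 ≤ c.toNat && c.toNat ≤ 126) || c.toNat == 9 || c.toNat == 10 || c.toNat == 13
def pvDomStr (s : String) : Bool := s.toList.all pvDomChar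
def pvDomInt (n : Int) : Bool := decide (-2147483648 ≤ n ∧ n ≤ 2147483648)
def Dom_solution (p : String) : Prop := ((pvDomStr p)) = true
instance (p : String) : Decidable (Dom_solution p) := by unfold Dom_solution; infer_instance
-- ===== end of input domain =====

-- B replaces A's recursion-on-the-suffix by one balance scan cutting p into minimal
-- balanced chunks followed by a right-to-left fold over the chunk list (objective: alternative).

-- ===== PORT A =====

-- check_correct: l_count scan with early False on l_count < 0
def pvCheckA (l : Int) : List Char → Bool
  | [] => true
  | c :: cs =>
    let l' := if c = '(' then l + 1 else l - 1
    if l' < 0 then false else pvCheckA l' cs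

-- split_u_v's loop: returns the final l_count + r_count (the cut index)
def pvSplitGo (l r : Nat) : List Char → Nat
  | [] => l + r
  | c :: cs =>
    if l = r ∧ 0 < l then l + r
    else if c = '(' then pvSplitGo (l + 1) r cs else pvSplitGo l (r + 1) cs

theorem pvSplitGo_le (s : List Char) : ∀ l r : Nat, l + r ≤ pvSplitGo l r s := by
  induction s with
  | nil => intro l r; simp [pvSplitGo]
  | cons c cs ih =>
    intro l r
    simp only [pvSplitGo]
    split
    · exact le_refl _
    · split
      · exact le_trans (by omega) (ih (l + 1) r)
      · exact le_trans (by omega) (ih l (r + 1))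

theorem pvSplitGo_pos (c : Char) (cs : List Char) : 1 ≤ pvSplitGo 0 0 (c :: cs) := by
  have h1 := pvSplitGo_le cs 1 0
  have h2 := pvSplitGo_le cs 0 1
  by_cases hc : c = '(' <;> simp [pvSplitGo, hc] <;> omega

-- the u[1:-1] flip loop: each "(" becomes ")" and every other char "("
def pvFlipA (u : List Char) : List Char :=
  ((u.drop 1).dropLast).map (fun c => if c = '(' then ')' else '(')

-- solution, recursion on the suffix v; u = p[:k], v = p[k:] inlined
-- (u[1:-1] ported as drop 1 + dropLast — exact on lists)
def pvSolA (p : List Char) : List Char :=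
  if h : p = [] then []
  else if pvCheckA 0 (p.take (pvSplitGo 0 0 p)) then
    p.take (pvSplitGo 0 0 p) ++ pvSolA (p.drop (pvSplitGo 0 0 p))
  else
    '(' :: (pvSolA (p.drop (pvSplitGo 0 0 p)) ++ [')'] ++ pvFlipA (p.take (pvSplitGo 0 0 p)))
termination_by p.length
decreasing_by
  all_goals
    cases p with
    | nil => exact absurd rfl h
    | cons c cs =>
      have h1 := pvSplitGo_pos c cs
      simp only [List.length_drop, List.length_cons]
      omega

def solution (p : String) : String := String.ofList (pvSolA p.toList)

-- ===== PORT B =====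

-- _never_dips: balance scan with early False
def pvOkB (bal : Int) : List Char → Bool
  | [] => true
  | c :: cs =>
    let b' := if c = '(' then bal + 1 else bal - 1
    if b' < 0 then false else pvOkB b' cs

-- phase 1 loop: cut when the running balance hits 0; the slice p[start:i+1] is
-- realized by accumulating the current chunk's characters in cur (exact)
def pvChunks (bal : Int) (cur : List Char) : List Char → List (List Char)
  | [] => if cur = [] then [] else [cur]
  | c :: cs =>
    let b' := if c = '(' then bal + 1 else bal - 1
    if b' = 0 then (cur ++ [c]) :: pvChunks 0 [] cs
    else pvChunks b' (cur ++ [c]) cs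

def pvFlipB (u : List Char) : List Char :=
  ((u.drop 1).dropLast).map (fun c => if c = '(' then ')' else '(')

-- phase 2: the reversed-order loop is a right fold over the chunk list
def pvStepB (u acc : List Char) : List Char :=
  if pvOkB 0 u then u ++ acc
  else '(' :: (acc ++ [')'] ++ pvFlipB u)

def pvSolB (p : List Char) : List Char := (pvChunks 0 [] p).foldr pvStepB []

def solution_alt (p : String) : String := String.ofList (pvSolB p.toList)

-- ===== PRECONDITION & SPEC =====
def Spec_solution (p : String) (out : String) : Prop := out = solution_alt p
instance (p : String) (out : String) : Decidable (Spec_solution p out) := by unfold Spec_solution; infer_instance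

-- ===== CLAIM (what is proved, stated in full; the proofs are below) =====
def Claim_equal_solution : Prop := ∀ (p : String), Dom_solution p → Spec_solution p (solution p)

-- ===== LEMMAS AND PROOFS =====

theorem check_eq (s : List Char) : ∀ l : Int, pvOkB l s = pvCheckA l s := by
  induction s with
  | nil => intro l; rfl
  | cons c cs ih => intro l; simp only [pvOkB, pvCheckA]; split <;> simp [ih]

-- once l = r > 0, split_u_v's loop stops at once
theorem pvSplitGo_stop (s : List Char) (l r : Nat) (he : l = r) (hp : 0 < l) :
    pvSplitGo l r s = l + r := by
  cases s with
  | nil => rfl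
  | cons c cs => simp only [pvSplitGo]; rw [if_pos ⟨he, hp⟩]

-- B's chunker tracked from mid-chunk state (l ≠ r ⇔ balance ≠ 0) lands on A's cut point
theorem chunk_split (s : List Char) : ∀ (l r : Nat) (pre : List Char), pre ≠ [] → l ≠ r →
    pvChunks ((l : Int) - r) pre s =
      (pre ++ s.take (pvSplitGo l r s - (l + r))) ::
        pvChunks 0 [] (s.drop (pvSplitGo l r s - (l + r))) := by
  induction s with
  | nil =>
    intro l r pre hpre _
    simp [pvChunks, pvSplitGo, hpre]
  | cons c cs ih =>
    intro l r pre hpre hlr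
    have hnb : ¬ (l = r ∧ 0 < l) := by omega
    by_cases hc : c = '('
    · subst hc
      simp only [pvChunks, pvSplitGo, if_neg hnb, reduceIte]
      by_cases hz : ((l : Int) - r) + 1 = 0
      · -- cut here: the updated counters are equal and positive
        have hl1 : l + 1 = r := by omega
        rw [if_pos hz, pvSplitGo_stop cs (l + 1) r hl1 (by omega)]
        have h1 : l + 1 + r - (l + r) = 1 := by omega
        rw [h1]; simp
      · have hlr' : l + 1 ≠ r := by omega
        rw [if_neg hz]
        have hcast : ((l : Int) - r) + 1 = ((l + 1 : Nat) : Int) - r := by push_cast; ring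
        rw [hcast, ih (l + 1) r (pre ++ ['(']) (by simp) hlr']
        have hge := pvSplitGo_le cs (l + 1) r
        have h1 : pvSplitGo (l + 1) r cs - (l + r) = (pvSplitGo (l + 1) r cs - (l + 1 + r)) + 1 := by omega
        rw [h1]
        simp [List.take_succ_cons, List.drop_succ_cons]
    · simp only [pvChunks, pvSplitGo, if_neg hnb, if_neg hc]
      by_cases hz : ((l : Int) - r) - 1 = 0
      · have hl1 : l = r + 1 := by omega
        rw [if_pos hz, pvSplitGo_stop cs l (r + 1) hl1 (by omega)]
        have h1 : l + (r + 1) - (l + r) = 1 := by omega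
        rw [h1]; simp
      · have hlr' : l ≠ r + 1 := by omega
        rw [if_neg hz]
        have hcast : ((l : Int) - r) - 1 = ((l : Nat) : Int) - ((r + 1 : Nat) : Int) := by push_cast; ring
        rw [hcast, ih l (r + 1) (pre ++ [c]) (by simp) hlr']
        have hge := pvSplitGo_le cs l (r + 1)
        have h1 : pvSplitGo l (r + 1) cs - (l + r) = (pvSplitGo l (r + 1) cs - (l + (r + 1))) + 1 := by omega
        rw [h1]
        simp [List.take_succ_cons, List.drop_succ_cons]

-- on a nonempty p, B's chunk list is A's (u, v) split, chunked recursively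
theorem chunks_cons (c : Char) (cs : List Char) :
    pvChunks 0 [] (c :: cs) =
      ((c :: cs).take (pvSplitGo 0 0 (c :: cs))) ::
        pvChunks 0 [] ((c :: cs).drop (pvSplitGo 0 0 (c :: cs))) := by
  by_cases hc : c = '('
  · subst hc
    have h0 : pvSplitGo 0 0 ('(' :: cs) = pvSplitGo 1 0 cs := by simp [pvSplitGo]
    have hch : pvChunks 0 [] ('(' :: cs) = pvChunks 1 ['('] cs := by simp [pvChunks]
    have hcs := chunk_split cs 1 0 ['('] (by simp) (by omega)
    norm_num at hcs
    rw [h0, hch, hcs]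
    have hge := pvSplitGo_le cs 1 0
    rw [show pvSplitGo 1 0 cs = (pvSplitGo 1 0 cs - 1) + 1 from by omega]
    simp [List.take_succ_cons, List.drop_succ_cons]
  · have h0 : pvSplitGo 0 0 (c :: cs) = pvSplitGo 0 1 cs := by simp [pvSplitGo, hc]
    have hch : pvChunks 0 [] (c :: cs) = pvChunks (-1) [c] cs := by simp [pvChunks, hc]
    have hcs := chunk_split cs 0 1 [c] (by simp) (by omega)
    norm_num at hcs
    rw [h0, hch, hcs]
    have hge := pvSplitGo_le cs 0 1
    rw [show pvSplitGo 0 1 cs = (pvSplitGo 0 1 cs - 1) + 1 from by omega]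
    simp [List.take_succ_cons, List.drop_succ_cons]

theorem solAB : ∀ (n : Nat) (p : List Char), p.length ≤ n → pvSolA p = pvSolB p := by
  intro n
  induction n with
  | zero =>
    intro p hp
    have hnil : p = [] := by cases p <;> simp_all
    subst hnil
    simp [pvSolA, pvSolB, pvChunks]
  | succ n ih =>
    intro p hp
    cases p with
    | nil => simp [pvSolA, pvSolB, pvChunks]
    | cons c cs =>
      rw [pvSolA, dif_neg (List.cons_ne_nil c cs)]
      have hk1 : 1 ≤ pvSplitGo 0 0 (c :: cs) := pvSplitGo_pos c cs
      have hv : ((c :: cs).drop (pvSplitGo 0 0 (c :: cs))).length ≤ n := by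
        simp only [List.length_drop, List.length_cons]
        simp only [List.length_cons] at hp
        omega
      rw [ih _ hv]
      conv_rhs => rw [pvSolB, chunks_cons c cs, List.foldr_cons]
      rw [pvStepB, check_eq]
      split <;> simp [pvFlipA, pvFlipB, pvSolB]

-- ===== VERDICT (by name: the statement is the Claim_ definition above) =====
theorem solution_spec : Claim_equal_solution := by
  intro p _
  unfold Spec_solution solution solution_alt
  rw [solAB p.toList.length p.toList le_rfl]
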